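-- pv_equiv track=rewrite | github.com/Jekell1/AskOTIS | calculate_complexity_metrics.py | estimate_max_nesting_depth
-- ===== SOURCE A (Python) =====
-- def estimate_max_nesting_depth(content: str) -> int:
--     """Estimate maximum nesting depth of control structures."""
--     lines = content.split('\n')
--     max_depth = 0
--     current_depth = 0
--
--     # Track nesting by IF/EVALUATE/PERFORM
--     for line in lines:
--         upper_line = line.upper().strip()
--
--         # Increase depth
--         if (upper_line.startswith('IF ') or
--             upper_line.startswith('EVALUATE ') or
--             'PERFORM UNTIL' in upper_line or
--             'PERFORM VARYING' in upper_line):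
--             current_depth += 1
--             max_depth = max(max_depth, current_depth)
--
--         # Decrease depth
--         elif upper_line.startswith('END-IF') or upper_line.startswith('END-EVALUATE'):
--             current_depth = max(0, current_depth - 1)
--
--     return max_depth
-- ===== SOURCE B (Python) =====
-- def _delta(line):
--     u = line.upper().strip()
--     if (u.startswith('IF ') or u.startswith('EVALUATE ')
--             or 'PERFORM UNTIL' in u or 'PERFORM VARYING' in u):
--         return 1
--     if u.startswith('END-IF') or u.startswith('END-EVALUATE'):
--         return -1
--     return 0
--
--
-- def estimate_max_nesting_depth(content: str) -> int:
--     # Max-drawup ("best stock profit") algorithm: build the UNCLAMPED prefix sums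
--     # of the per-line depth deltas, then return the largest rise of that walk,
--     # max over i of (S_i - min_{j<=i} S_j).  This equals A's clamped-depth peak
--     # because the clamped walk's value is exactly the prefix sum's height above
--     # its running minimum.
--     prefix = [0]
--     for line in content.split('\n'):
--         prefix.append(prefix[-1] + _delta(line))
--     lo = 0
--     best = 0
--     for v in prefix:
--         lo = min(lo, v)
--         best = max(best, v - lo)
--     return best
-- ===== Notes on version B (the rewrite author's own statement) =====
-- stated objective: alternative
-- what changed: A simulates a clamped nesting depth with a running max; B computes unclamped prefix sums of per-line deltas and returns the maximum drawup (largest rise above the running minimum), the classic best-stock-profit scheme.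
import Mathlib
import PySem

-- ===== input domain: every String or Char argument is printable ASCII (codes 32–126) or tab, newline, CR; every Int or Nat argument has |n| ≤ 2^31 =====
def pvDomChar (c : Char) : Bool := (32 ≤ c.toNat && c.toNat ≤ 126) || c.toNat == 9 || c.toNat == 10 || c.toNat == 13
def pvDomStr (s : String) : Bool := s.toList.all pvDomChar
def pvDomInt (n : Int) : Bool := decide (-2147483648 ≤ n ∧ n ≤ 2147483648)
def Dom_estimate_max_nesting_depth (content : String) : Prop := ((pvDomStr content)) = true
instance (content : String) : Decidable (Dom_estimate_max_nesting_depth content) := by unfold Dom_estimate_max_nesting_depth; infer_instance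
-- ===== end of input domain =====

-- B replaces A's clamped depth simulation with unclamped prefix sums plus a max-drawup scan (best-stock-profit scheme); same cost, proved equal.

-- ===== PORT A =====
-- loop body of A's for-loop: state = (max_depth, current_depth)
def pvStepA (st : Int × Int) (line : List Char) : Int × Int :=
  -- (PySem.Chars.strip (PySem.Chars.upper line)) = line.upper().strip(), written inline at each use
  if PySem.Chars.startswith (PySem.Chars.strip (PySem.Chars.upper line)) "IF ".toList || PySem.Chars.startswith (PySem.Chars.strip (PySem.Chars.upper line)) "EVALUATE ".toList ||
     PySem.Chars.isIn "PERFORM UNTIL".toList (PySem.Chars.strip (PySem.Chars.upper line)) || PySem.Chars.isIn "PERFORM VARYING".toList (PySem.Chars.strip (PySem.Chars.upper line)) then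
    (max st.1 (st.2 + 1), st.2 + 1)
  else if PySem.Chars.startswith (PySem.Chars.strip (PySem.Chars.upper line)) "END-IF".toList || PySem.Chars.startswith (PySem.Chars.strip (PySem.Chars.upper line)) "END-EVALUATE".toList then
    (st.1, max 0 (st.2 - 1))
  else st

def estimate_max_nesting_depth (content : String) : Int :=
  ((PySem.Chars.splitOn content.toList "\n".toList).foldl pvStepA (0, 0)).1

-- ===== PORT B =====
-- B's _delta helper: classify a line as +1 / -1 / 0
def pvDelta (line : List Char) : Int :=
  if PySem.Chars.startswith (PySem.Chars.strip (PySem.Chars.upper line)) "IF ".toList || PySem.Chars.startswith (PySem.Chars.strip (PySem.Chars.upper line)) "EVALUATE ".toList ||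
     PySem.Chars.isIn "PERFORM UNTIL".toList (PySem.Chars.strip (PySem.Chars.upper line)) || PySem.Chars.isIn "PERFORM VARYING".toList (PySem.Chars.strip (PySem.Chars.upper line)) then 1
  else if PySem.Chars.startswith (PySem.Chars.strip (PySem.Chars.upper line)) "END-IF".toList || PySem.Chars.startswith (PySem.Chars.strip (PySem.Chars.upper line)) "END-EVALUATE".toList then -1
  else 0

-- B's first loop body: state = (last prefix value, prefix list)
def pvPrefStep (st : Int × List Int) (line : List Char) : Int × List Int :=
  (st.1 + pvDelta line, st.2 ++ [st.1 + pvDelta line])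

-- B's second loop body: state = (lo, best)
def pvDrawStep (st : Int × Int) (v : Int) : Int × Int :=
  (min st.1 v, max st.2 (v - min st.1 v))

def estimate_max_nesting_depth_alt (content : String) : Int :=
  -- pass 1 builds the prefix list, pass 2 scans it for the max drawup
  (((((PySem.Chars.splitOn content.toList "\n".toList).foldl pvPrefStep (0, [0])).2)).foldl pvDrawStep (0, 0)).2

-- ===== PRECONDITION & SPEC =====
def Spec_estimate_max_nesting_depth (content : String) (out : Int) : Prop := out = estimate_max_nesting_depth_alt content
instance (content : String) (out : Int) : Decidable (Spec_estimate_max_nesting_depth content out) := by unfold Spec_estimate_max_nesting_depth; infer_instance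

-- ===== CLAIM (what is proved, stated in full; the proofs are below) =====
def Claim_equal_estimate_max_nesting_depth : Prop := ∀ (content : String), Dom_estimate_max_nesting_depth content → Spec_estimate_max_nesting_depth content (estimate_max_nesting_depth content)

-- ===== LEMMAS AND PROOFS =====

-- the tail of the prefix-sum list produced from running sum s
def pvSums (lines : List (List Char)) (s : Int) : List Int :=
  match lines with
  | [] => []
  | l :: t => (s + pvDelta l) :: pvSums t (s + pvDelta l)

lemma pv_pref_spec (lines : List (List Char)) : ∀ (s : Int) (pre : List Int),
    (lines.foldl pvPrefStep (s, pre)).2 = pre ++ pvSums lines s := by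
  induction lines with
  | nil => intro s pre; simp [pvSums]
  | cons l t ih =>
    intro s pre
    simp only [List.foldl_cons, pvPrefStep, pvSums, ih, List.append_assoc, List.singleton_append]

-- invariant linking A's state (maxd, cur) to B's drawup state (lo, best) at running sum s:
-- cur = s - lo, maxd = best, 0 ≤ cur ≤ maxd
lemma pv_fold_eq (lines : List (List Char)) : ∀ (s lo best : Int),
    lo ≤ s → s - lo ≤ best →
    (lines.foldl pvStepA (best, s - lo)).1 = ((pvSums lines s).foldl pvDrawStep (lo, best)).2 := by
  induction lines with
  | nil => intro s lo best _ _; rfl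
  | cons l t ih =>
    intro s lo best h0 h1
    simp only [pvSums, List.foldl_cons]
    unfold pvStepA pvDrawStep
    rw [show pvDelta l = if PySem.Chars.startswith (PySem.Chars.strip (PySem.Chars.upper l)) "IF ".toList || PySem.Chars.startswith (PySem.Chars.strip (PySem.Chars.upper l)) "EVALUATE ".toList ||
     PySem.Chars.isIn "PERFORM UNTIL".toList (PySem.Chars.strip (PySem.Chars.upper l)) || PySem.Chars.isIn "PERFORM VARYING".toList (PySem.Chars.strip (PySem.Chars.upper l)) then 1
     else if PySem.Chars.startswith (PySem.Chars.strip (PySem.Chars.upper l)) "END-IF".toList || PySem.Chars.startswith (PySem.Chars.strip (PySem.Chars.upper l)) "END-EVALUATE".toList then -1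
     else 0 from rfl]
    split_ifs with hinc hdec
    · -- delta = +1: lo unchanged, best picks up the new height
      have hA : (max best (s - lo + 1), s - lo + 1) =
          (max best ((s + 1) - min lo (s + 1)), (s + 1) - min lo (s + 1)) := by
        rw [Prod.mk.injEq]; omega
      rw [hA]
      exact ih _ _ _ (by omega) (by omega)
    · -- delta = -1: clamp at 0 ↔ running minimum drops
      have hA : (best, max 0 (s - lo - 1)) =
          (max best ((s + -1) - min lo (s + -1)), (s + -1) - min lo (s + -1)) := by
        rw [Prod.mk.injEq]; omega
      rw [hA]
      exact ih _ _ _ (by omega) (by omega)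
    · -- delta = 0: nothing moves
      have hA : ((best : Int), s - lo) =
          (max best ((s + 0) - min lo (s + 0)), (s + 0) - min lo (s + 0)) := by
        rw [Prod.mk.injEq]; omega
      rw [hA]
      exact ih _ _ _ (by omega) (by omega)

-- ===== VERDICT (by name: the statement is the Claim_ definition above) =====
theorem estimate_max_nesting_depth_spec : Claim_equal_estimate_max_nesting_depth := by
  intro content _
  unfold Spec_estimate_max_nesting_depth estimate_max_nesting_depth estimate_max_nesting_depth_alt
  rw [pv_pref_spec, List.singleton_append, List.foldl_cons]
  have : pvDrawStep (0, 0) 0 = (0, 0) := by simp [pvDrawStep]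
  rw [this]
  have := pv_fold_eq (PySem.Chars.splitOn content.toList "\n".toList) 0 0 0 le_rfl (by omega)
  simpa using this
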